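-- pv_equiv track=rewrite | github.com/yasminargueb-sketch/pyt | Lab_python/ex2.py | CreateLM
-- ===== SOURCE A (Python) =====
-- def CreateLM(ch, key):
--     N = len(key)
--
--     # add spaces
--     while len(ch) % N != 0:
--         ch += " "
--
--     LM = []
--     for i in range(0, len(ch), N):
--         LM.append(list(ch[i:i+N]))
--
--     return LM
-- ===== SOURCE B (Python) =====
-- def CreateLM(ch, key):
--     N = len(key)
--     nrows = (len(ch) + N - 1) // N
--     return [[ch[r * N + c] if r * N + c < len(ch) else " " for c in range(N)]
--             for r in range(nrows)]
-- ===== Notes on version B (the rewrite author's own statement) =====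
-- stated objective: alternative
-- what changed: B never pads anything: it computes the row count by ceiling division and constructs every cell (r,c) directly by the index formula ch[r*N+c] (or a space when the index is past the end), instead of A's grow-a-padded-string-then-slice approach.
import Mathlib
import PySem

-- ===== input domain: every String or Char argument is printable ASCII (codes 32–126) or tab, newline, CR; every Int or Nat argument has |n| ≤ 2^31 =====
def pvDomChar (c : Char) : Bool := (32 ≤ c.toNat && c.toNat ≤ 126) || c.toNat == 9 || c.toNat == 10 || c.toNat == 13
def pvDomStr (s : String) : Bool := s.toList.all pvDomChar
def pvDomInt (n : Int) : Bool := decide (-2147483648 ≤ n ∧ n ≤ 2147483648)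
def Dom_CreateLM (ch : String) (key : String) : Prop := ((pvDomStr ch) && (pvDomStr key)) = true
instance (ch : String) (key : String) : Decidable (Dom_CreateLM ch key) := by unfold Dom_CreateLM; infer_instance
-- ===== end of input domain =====

-- B builds each cell directly from an index formula (space when past the end) after a
-- ceiling-division row count, instead of growing a padded copy of the string and slicing it.


-- ===== PORT A =====
-- the `while len(ch) % N != 0: ch += " "` loop (guarded by N ≠ 0, where Python would raise)
def padA (s : List Char) (N : Nat) : List Char :=
  if _h : N ≠ 0 ∧ s.length % N ≠ 0 then padA (s ++ [' ']) N else s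
termination_by (N - s.length % N) % N
decreasing_by
  rcases _h with ⟨hN, hr⟩
  have hN0 : 0 < N := Nat.pos_of_ne_zero hN
  have hrlt : s.length % N < N := Nat.mod_lt _ hN0
  have h1m : 1 % N = 1 := Nat.mod_eq_of_lt (by omega)
  have h1 : (s.length + 1) % N = (s.length % N + 1) % N := by
    rw [Nat.add_mod s.length 1 N, h1m]
  simp only [List.length_append, List.length_cons, List.length_nil, Nat.zero_add]
  rw [h1]
  by_cases hc : s.length % N + 1 = N
  · rw [hc, Nat.mod_self, Nat.sub_zero, Nat.mod_self,
      Nat.mod_eq_of_lt (show N - s.length % N < N by omega)]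
    omega
  · rw [Nat.mod_eq_of_lt (show s.length % N + 1 < N by omega),
      Nat.mod_eq_of_lt (show N - (s.length % N + 1) < N by omega),
      Nat.mod_eq_of_lt (show N - s.length % N < N by omega)]
    omega

def CreateLM (ch : String) (key : String) : List (List String) :=
  let N : Nat := key.toList.length
  let padded : List Char := padA ch.toList N
  (PySem.List.pyRange 0 (padded.length : Int) (N : Int)).foldl
    (fun LM i =>
      LM ++ [(PySem.List.slice padded (some i) (some (i + (N : Int)))).map
        (fun c => String.ofList [c])]) []

-- ===== PORT B =====
def CreateLM_alt (ch : String) (key : String) : List (List String) :=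
  let N : Nat := key.toList.length
  let L : List Char := ch.toList
  let nrows : Int := PySem.Int.floordiv ((L.length : Int) + (N : Int) - 1) (N : Int)
  (PySem.List.pyRange 0 nrows 1).map (fun r =>
    (PySem.List.pyRange 0 (N : Int) 1).map (fun c =>
      -- the guarded index r*N+c is nonneg and < len, so getD with .toNat is exact Python ch[r*N+c]
      if r * (N : Int) + c < (L.length : Int) then
        String.ofList [L.getD (r * (N : Int) + c).toNat ' ']
      else " "))

-- ===== PRECONDITION & SPEC =====
-- Pre_ excludes only key = "", where both Pythons raise ZeroDivisionError (len(ch) % 0, resp. // 0).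
def Pre_CreateLM (ch : String) (key : String) : Prop := key ≠ ""
instance (ch : String) (key : String) : Decidable (Pre_CreateLM ch key) := by
  unfold Pre_CreateLM; infer_instance
def pvWitness_CreateLM : String × String := ("hello world", "key")

def Spec_CreateLM (ch : String) (key : String) (out : List (List String)) : Prop := out = CreateLM_alt ch key
instance (ch : String) (key : String) (out : List (List String)) : Decidable (Spec_CreateLM ch key out) := by unfold Spec_CreateLM; infer_instance

-- ===== CLAIM (what is proved, stated in full; the proofs are below) =====
def Claim_equal_CreateLM : Prop := ∀ (ch : String) (key : String), Dom_CreateLM ch key → Pre_CreateLM ch key → Spec_CreateLM ch key (CreateLM ch key)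

-- ===== LEMMAS AND PROOFS =====

theorem foldl_snoc {α β : Type} (xs : List α) (init : List (List β)) (f : α → List β) :
    xs.foldl (fun acc x => acc ++ [f x]) init = init ++ xs.map f := by
  induction xs generalizing init with
  | nil => simp
  | cons x xs ih => simp [List.foldl_cons, ih]

theorem padA_eq (s : List Char) (N : Nat) :
    padA s N = s ++ List.replicate ((N - s.length % N) % N) ' ' := by
  fun_induction padA s N with
  | case1 s h ih =>
    rcases h with ⟨hN, hr⟩
    have hN0 : 0 < N := Nat.pos_of_ne_zero hN
    have hrlt : s.length % N < N := Nat.mod_lt _ hN0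
    have h1m : 1 % N = 1 := Nat.mod_eq_of_lt (by omega)
    have h1 : (s.length + 1) % N = (s.length % N + 1) % N := by
      rw [Nat.add_mod s.length 1 N, h1m]
    rw [ih]
    simp only [List.length_append, List.length_cons, List.length_nil, Nat.zero_add]
    rw [h1]
    by_cases hc : s.length % N + 1 = N
    · rw [hc, Nat.mod_self, Nat.sub_zero, Nat.mod_self,
        Nat.mod_eq_of_lt (show N - s.length % N < N by omega)]
      have : N - s.length % N = 1 := by omega
      simp [this]
    · rw [Nat.mod_eq_of_lt (show s.length % N + 1 < N by omega),
        Nat.mod_eq_of_lt (show N - (s.length % N + 1) < N by omega),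
        Nat.mod_eq_of_lt (show N - s.length % N < N by omega)]
      have h2 : N - s.length % N = (N - (s.length % N + 1)) + 1 := by omega
      rw [h2, List.replicate_succ, List.append_assoc]
      rfl
  | case2 s h =>
    rcases Nat.eq_zero_or_pos N with h0 | h0
    · subst h0; simp
    · have : s.length % N = 0 := by
        by_contra hc; exact h ⟨by omega, hc⟩
      simp [this]

theorem natCast_div_eq (a b : Nat) : ((a:Int)) / (b:Int) = ((a / b : Nat) : Int) := by
  push_cast; ring

-- pyRange with positive step n over a multiple of n is the n·k grid
theorem pyRange_step_dvd (n M : Nat) (hn : 0 < n) (hdvd : n ∣ M) :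
    PySem.List.pyRange 0 (M : Int) (n : Int) =
      (List.range (M / n)).map (fun k => ((n * k : Nat) : Int)) := by
  rw [PySem.List.pyRange_of_pos 0 (M : Int) (show (0:Int) < (n:Int) by exact_mod_cast hn)]
  have hcount : (if (0:Int) < (M:Int) then (((M:Int) - 0 + (n:Int) - 1) / (n:Int)).toNat else 0)
      = M / n := by
    by_cases hM : 0 < M
    · rw [if_pos (by exact_mod_cast hM)]
      have e1 : (M:Int) - 0 + (n:Int) - 1 = ((M + (n-1) : Nat) : Int) := by omega
      rw [e1, natCast_div_eq, Int.toNat_natCast]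
      obtain ⟨k, rfl⟩ := hdvd
      rw [Nat.mul_add_div hn, Nat.div_eq_of_lt (by omega), Nat.mul_div_cancel_left _ (by omega)]
      omega
    · rw [if_neg (by exact_mod_cast hM), show M = 0 by omega, Nat.zero_div]
  rw [hcount]
  apply List.map_congr_left
  intro k _
  push_cast; ring

-- ceiling division agrees with length-of-padded-string division
theorem ceil_div_eq (l n : Nat) (hn : 0 < n) :
    (l + n - 1) / n = (l + (n - l % n) % n) / n := by
  have hmod := Nat.div_add_mod l n
  by_cases hr : l % n = 0
  · rw [hr, Nat.sub_zero, Nat.mod_self, Nat.add_zero]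
    obtain ⟨k, rfl⟩ := Nat.dvd_of_mod_eq_zero hr
    rw [show n * k + n - 1 = n * k + (n - 1) by omega, Nat.mul_add_div hn,
      Nat.div_eq_of_lt (by omega), Nat.mul_div_cancel_left _ (by omega)]
    omega
  · have hrlt : l % n < n := Nat.mod_lt _ hn
    rw [Nat.mod_eq_of_lt (show n - l % n < n by omega)]
    rw [show l + (n - l % n) = n * (l / n) + n by omega,
      show l + n - 1 = n * (l / n) + (l % n + n - 1) by omega,
      Nat.mul_add_div hn, Nat.mul_add_div hn, Nat.div_self hn,
      Nat.div_eq_of_lt_le (show 1 * n ≤ l % n + n - 1 by omega)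
        (show l % n + n - 1 < (1 + 1) * n by omega)]

theorem CreateLM_spec : Claim_equal_CreateLM := by
  intro ch key _hdom hpre
  unfold Pre_CreateLM at hpre
  unfold Spec_CreateLM CreateLM CreateLM_alt
  dsimp only
  have hn : 0 < key.toList.length := by
    rcases Nat.eq_zero_or_pos key.toList.length with h | h
    · exact absurd (String.toList_eq_nil_iff.mp (List.eq_nil_of_length_eq_zero h)) hpre
    · exact h
  generalize key.toList.length = n at hn
  generalize ch.toList = L
  rw [padA_eq]
  set l := L.length with hl_def
  set pad := (n - l % n) % n with hpad_def
  have hpadlt : pad < n := Nat.mod_lt _ hn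
  have hdvd : n ∣ (l + pad) := by
    by_cases hr : l % n = 0
    · have : pad = 0 := by rw [hpad_def, hr, Nat.sub_zero, Nat.mod_self]
      rw [this, Nat.add_zero]
      exact Nat.dvd_of_mod_eq_zero hr
    · have hrlt : l % n < n := Nat.mod_lt _ hn
      have hmod := Nat.div_add_mod l n
      have : pad = n - l % n := by
        rw [hpad_def, Nat.mod_eq_of_lt (by omega)]
      refine ⟨l / n + 1, ?_⟩
      have hd : n * (l / n + 1) = n * (l / n) + n := by ring
      omega
  set q := (l + pad) / n with hq_def
  have hqn : q * n = l + pad := Nat.div_mul_cancel hdvd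
  have hlenP : (L ++ List.replicate pad ' ').length = l + pad := by
    simp [hl_def]
  rw [foldl_snoc, hlenP, pyRange_step_dvd n (l + pad) hn hdvd,
    PySem.Int.floordiv_eq_ediv_of_pos (show (0:Int) < (n:Int) by exact_mod_cast hn),
    show (l:Int) + (n:Int) - 1 = ((l + n - 1 : Nat) : Int) by omega,
    natCast_div_eq, ceil_div_eq l n hn]
  rw [PySem.List.pyRange_one, PySem.List.pyRange_one]
  simp only [List.nil_append, Int.sub_zero, Int.toNat_natCast, zero_add, List.map_map]
  apply List.map_congr_left
  intro k hk
  rw [List.mem_range] at hk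
  simp only [Function.comp_def]
  have hk1 : n * k + n ≤ l + pad := by
    have h1 : n * k + n ≤ q * n := by
      calc n * k + n = (k + 1) * n := by ring
        _ ≤ q * n := Nat.mul_le_mul_right n (by omega)
    exact hqn ▸ h1
  -- A-side row k = the characters at indices n*k … n*k+n-1 of the padded list
  rw [PySem.List.slice_natCast_add]
  -- compare element-wise with B-side row k
  apply List.ext_getElem
  · simp only [List.length_map, List.length_take, List.length_drop, List.length_append,
      List.length_replicate, List.length_range, ← hl_def]
    omega
  · intro c hc1 hc2
    simp only [List.getElem_map, List.getElem_range, List.getElem_take, List.getElem_drop]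
    have hidx : ((k:Int)) * (n:Int) + (c:Int) = ((n * k + c : Nat) : Int) := by
      push_cast; ring
    by_cases hcl : n * k + c < l
    · rw [if_pos (by rw [hidx]; exact_mod_cast hcl)]
      rw [List.getElem_append_left (show n * k + c < L.length from hcl), hidx,
        Int.toNat_natCast, List.getD_eq_getElem L ' ' (show n * k + c < L.length from hcl)]
    · rw [if_neg (by rw [hidx]; intro hcon; exact hcl (by exact_mod_cast hcon))]
      rw [List.getElem_append_right (show L.length ≤ n * k + c by omega)]
      simp only [List.getElem_replicate]

-- ===== VERDICT =====
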